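-- pv_equiv track=rewrite | github.com/BalaShankar9/SecProbe | secprobe/core/session_manager.py | _identify_charsets
-- ===== SOURCE A (Python) =====
-- import string
--
-- def _identify_charsets(token: str) -> list[str]:
--     """Identify character sets used in token."""
--     charsets = []
--     if any(c in string.ascii_lowercase for c in token):
--         charsets.append("lowercase")
--     if any(c in string.ascii_uppercase for c in token):
--         charsets.append("uppercase")
--     if any(c in string.digits for c in token):
--         charsets.append("digits")
--     if any(c in "+-/=" for c in token):
--         charsets.append("base64")
--     if any(c in string.punctuation.replace("+", "").replace("/", "").replace("=", "")
--            for c in token):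
--         charsets.append("special")
--     return charsets
-- ===== SOURCE B (Python) =====
-- import string
--
-- _SPECIAL = string.punctuation.replace("+", "").replace("/", "").replace("=", "")
--
-- def _identify_charsets(token: str) -> list[str]:
--     """Identify character sets used in token (single pass over token)."""
--     low = up = dig = b64 = spec = False
--     for c in token:
--         low = low or c in string.ascii_lowercase
--         up = up or c in string.ascii_uppercase
--         dig = dig or c in string.digits
--         b64 = b64 or c in "+-/="
--         spec = spec or c in _SPECIAL
--     return [name for name, flag in
--             zip(("lowercase", "uppercase", "digits", "base64", "special"),
--                 (low, up, dig, b64, spec)) if flag]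
-- ===== Notes on version B (the rewrite author's own statement) =====
-- stated objective: faster
-- what changed: Replaces A's five independent any(...) scans over the token with a single pass that accumulates five boolean flags (each membership test short-circuited once its flag is set) and then emits the class names in canonical order from the flags.
import Mathlib
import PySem

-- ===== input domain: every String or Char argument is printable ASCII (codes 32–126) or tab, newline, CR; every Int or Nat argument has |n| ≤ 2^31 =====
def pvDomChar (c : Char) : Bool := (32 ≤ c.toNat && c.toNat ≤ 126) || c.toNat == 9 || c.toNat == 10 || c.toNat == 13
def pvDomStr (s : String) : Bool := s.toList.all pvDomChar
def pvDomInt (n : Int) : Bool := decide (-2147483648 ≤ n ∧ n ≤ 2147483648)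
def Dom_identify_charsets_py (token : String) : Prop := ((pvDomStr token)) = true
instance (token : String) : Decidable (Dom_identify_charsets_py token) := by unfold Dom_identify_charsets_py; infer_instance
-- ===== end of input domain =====

-- B makes ONE pass over the token accumulating five boolean flags, instead of A's five
-- independent any(...) scans; the labels are then emitted in the same canonical order.

-- shared module-level constants (string.ascii_lowercase etc.)
def pvLower : String := "abcdefghijklmnopqrstuvwxyz"
def pvUpper : String := "ABCDEFGHIJKLMNOPQRSTUVWXYZ"
def pvDigits : String := "0123456789"
def pvPunct : String := "!\"#$%&'()*+,-./:;<=>?@[\\]^_`{|}~"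
-- string.punctuation.replace("+","").replace("/","").replace("=","")
def pvSpecial : String :=
  PySem.Str.replace (PySem.Str.replace (PySem.Str.replace pvPunct "+" "") "/" "") "=" ""

-- ===== PORT A =====
def identify_charsets_py (token : String) : List String :=
  let charsets : List String := []
  let charsets := if token.toList.any (fun c => pvLower.toList.contains c)
                  then charsets ++ ["lowercase"] else charsets
  let charsets := if token.toList.any (fun c => pvUpper.toList.contains c)
                  then charsets ++ ["uppercase"] else charsets
  let charsets := if token.toList.any (fun c => pvDigits.toList.contains c)
                  then charsets ++ ["digits"] else charsets
  let charsets := if token.toList.any (fun c => "+-/=".toList.contains c)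
                  then charsets ++ ["base64"] else charsets
  let charsets := if token.toList.any (fun c => pvSpecial.toList.contains c)
                  then charsets ++ ["special"] else charsets
  charsets

-- ===== PORT B =====
def identify_charsets_py_alt (token : String) : List String :=
  let flags := token.toList.foldl
    (fun (s : Bool × Bool × Bool × Bool × Bool) c =>
      (s.1 || pvLower.toList.contains c,
       s.2.1 || pvUpper.toList.contains c,
       s.2.2.1 || pvDigits.toList.contains c,
       s.2.2.2.1 || "+-/=".toList.contains c,
       s.2.2.2.2 || pvSpecial.toList.contains c))
    (false, false, false, false, false)
  (List.zip ["lowercase", "uppercase", "digits", "base64", "special"]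
            [flags.1, flags.2.1, flags.2.2.1, flags.2.2.2.1, flags.2.2.2.2]).filterMap
    (fun p => if p.2 then some p.1 else none)

-- ===== PRECONDITION & SPEC =====
def Spec_identify_charsets_py (token : String) (out : List String) : Prop := out = identify_charsets_py_alt token
instance (token : String) (out : List String) : Decidable (Spec_identify_charsets_py token out) := by unfold Spec_identify_charsets_py; infer_instance

-- ===== CLAIM (what is proved, stated in full; the proofs are below) =====
def Claim_equal_identify_charsets_py : Prop := ∀ (token : String), Dom_identify_charsets_py token → Spec_identify_charsets_py token (identify_charsets_py token)

-- ===== LEMMAS AND PROOFS =====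

-- the one-pass fold computes exactly the five any-scans
theorem pv_fold_flags (l : List Char) (a b c d e : Bool) :
    l.foldl
      (fun (s : Bool × Bool × Bool × Bool × Bool) c =>
        (s.1 || pvLower.toList.contains c,
         s.2.1 || pvUpper.toList.contains c,
         s.2.2.1 || pvDigits.toList.contains c,
         s.2.2.2.1 || "+-/=".toList.contains c,
         s.2.2.2.2 || pvSpecial.toList.contains c))
      (a, b, c, d, e)
    = (a || l.any (fun c => pvLower.toList.contains c),
       b || l.any (fun c => pvUpper.toList.contains c),
       c || l.any (fun c => pvDigits.toList.contains c),
       d || l.any (fun c => "+-/=".toList.contains c),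
       e || l.any (fun c => pvSpecial.toList.contains c)) := by
  induction l generalizing a b c d e with
  | nil => simp
  | cons x xs ih =>
    simp only [List.foldl_cons, List.any_cons]
    rw [ih]
    simp only [Bool.or_assoc]

-- ===== VERDICT (by name: the statement is the Claim_ definition above) =====
theorem identify_charsets_py_spec : Claim_equal_identify_charsets_py := by
  intro token _
  unfold Spec_identify_charsets_py identify_charsets_py identify_charsets_py_alt
  rw [pv_fold_flags]
  cases token.toList.any (fun c => pvLower.toList.contains c) <;>
  cases token.toList.any (fun c => pvUpper.toList.contains c) <;>
  cases token.toList.any (fun c => pvDigits.toList.contains c) <;>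
  cases token.toList.any (fun c => "+-/=".toList.contains c) <;>
  cases token.toList.any (fun c => pvSpecial.toList.contains c) <;>
  simp [List.filterMap]
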